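-- pv_equiv track=rewrite | github.com/WayoOchoa/GraphAlgorihtms-ALGS202 | Code/assign_2.py | ExploreOrdering
-- ===== SOURCE A (Python) =====
-- def ExploreOrdering(graph,v,visited,visit_orderings,clock):
--     visited[v] = 1
--     # Assign pre-visit number
--     visit_orderings,clock = previsit(v,visit_orderings,clock)
--     # follow path
--     for edge in graph[v]:
--         if visited[edge] == 0:
--             visited,visit_orderings,clock = ExploreOrdering(graph,edge,visited,visit_orderings,clock)
--     # Assign post-visit number
--     visit_orderings,clock = postvisit(v,visit_orderings,clock)
--     return visited,visit_orderings,clock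
--
-- def previsit(v,visit_orderings,clock):
--     visit_orderings[v][0] = clock
--     clock = clock + 1
--     return visit_orderings,clock
--
-- def postvisit(v,visit_orderings,clock):
--     visit_orderings[v][1] = clock
--     clock = clock + 1
--     return visit_orderings,clock
-- ===== SOURCE B (Python) =====
-- def ExploreOrdering(graph, v, visited, visit_orderings, clock):
--     # Iterative DFS with an explicit stack instead of recursion.
--     visited[v] = 1
--     visit_orderings[v][0] = clock
--     clock = clock + 1
--     stack = [(v, True)]
--     for e in reversed(graph[v]):
--         stack.append((e, False))
--     while stack:
--         node, processed = stack.pop()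
--         if processed:
--             visit_orderings[node][1] = clock
--             clock = clock + 1
--         elif visited[node] == 0:
--             visited[node] = 1
--             visit_orderings[node][0] = clock
--             clock = clock + 1
--             stack.append((node, True))
--             for e in reversed(graph[node]):
--                 stack.append((e, False))
--     return visited, visit_orderings, clock
-- ===== Notes on version B (the rewrite author's own statement) =====
-- stated objective: alternative
-- what changed: Replaced the recursive DFS (recursion inside the loop over graph[v]) by an iterative DFS driven by an explicit stack of (node, processed) frames, pushing neighbours in reverse and deciding visitedness at pop time.
import Mathlib
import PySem

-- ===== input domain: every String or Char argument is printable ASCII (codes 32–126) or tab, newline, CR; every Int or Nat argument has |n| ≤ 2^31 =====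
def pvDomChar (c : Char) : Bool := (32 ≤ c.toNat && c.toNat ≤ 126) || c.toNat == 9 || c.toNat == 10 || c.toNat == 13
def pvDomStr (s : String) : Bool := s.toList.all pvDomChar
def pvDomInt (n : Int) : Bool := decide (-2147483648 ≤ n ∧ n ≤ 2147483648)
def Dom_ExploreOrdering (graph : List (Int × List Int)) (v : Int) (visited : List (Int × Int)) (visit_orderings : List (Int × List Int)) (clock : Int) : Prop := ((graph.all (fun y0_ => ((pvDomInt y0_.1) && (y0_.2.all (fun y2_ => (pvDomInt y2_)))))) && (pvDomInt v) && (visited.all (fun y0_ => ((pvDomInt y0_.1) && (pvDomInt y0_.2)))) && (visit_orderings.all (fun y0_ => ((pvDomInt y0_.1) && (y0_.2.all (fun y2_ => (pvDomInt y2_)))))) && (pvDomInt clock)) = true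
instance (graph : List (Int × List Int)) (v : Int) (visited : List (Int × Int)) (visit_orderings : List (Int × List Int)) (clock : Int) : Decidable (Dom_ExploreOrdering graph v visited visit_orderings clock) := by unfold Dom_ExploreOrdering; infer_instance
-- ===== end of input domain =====

-- B replaces A's recursive DFS by an iterative DFS over an explicit stack of (node, processed)
-- frames (objective: alternative decomposition, same cost). Both Pythons mutate the argument
-- dicts in place in the same way; the equivalence proved here is about the returned value.

-- state threaded through the traversal: (visited, visit_orderings, clock)
abbrev PvSt := PySem.Dict Int Int × PySem.Dict Int (List Int) × Int

-- ===== PORT A =====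
-- helper previsit of Source A
def pvPrevisit (v : Int) (vo : PySem.Dict Int (List Int)) (clock : Int) :
    PySem.Dict Int (List Int) × Int :=
  (vo.insert v (PySem.List.pySetD (vo.getD v []) 0 clock), clock + 1)

-- helper postvisit of Source A
def pvPostvisit (v : Int) (vo : PySem.Dict Int (List Int)) (clock : Int) :
    PySem.Dict Int (List Int) × Int :=
  (vo.insert v (PySem.List.pySetD (vo.getD v []) 1 clock), clock + 1)

-- A's recursive DFS; the fuel argument is only a termination guard (never exhausted under Pre_)
def pvExploreA (G : PySem.Dict Int (List Int)) : Nat → Int → PvSt → PvSt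
  | 0, _, st => st
  | fuel+1, v, st =>
      let pr := pvPrevisit v st.2.1 st.2.2
      let st1 : PvSt := (st.1.insert v 1, pr.1, pr.2)
      let st2 := (G.getD v []).foldl
        (fun s e => if s.1.getD e 0 == 0 then pvExploreA G fuel e s else s) st1
      let po := pvPostvisit v st2.2.1 st2.2.2
      (st2.1, po.1, po.2)

def ExploreOrdering (graph : List (Int × List Int)) (v : Int) (visited : List (Int × Int)) (visit_orderings : List (Int × List Int)) (clock : Int) : (List (Int × Int)) × (List (Int × List Int)) × Int :=
  let st := pvExploreA (PySem.Dict.mk graph) (visited.length + 2) v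
    (PySem.Dict.mk visited, PySem.Dict.mk visit_orderings, clock)
  (st.1.items, st.2.1.items, st.2.2)

-- ===== PORT B =====
-- B's while loop over the explicit stack (top of stack = head of the list); the fuel argument
-- is only a termination guard for the expansion step (never exhausted under Pre_)
def pvRunB (G : PySem.Dict Int (List Int)) : Nat → List (Int × Bool) → PvSt → PvSt
  | _, [], st => st
  | fuel, (node, true) :: stack, st =>
      pvRunB G fuel stack
        (st.1, st.2.1.insert node (PySem.List.pySetD (st.2.1.getD node []) 1 st.2.2), st.2.2 + 1)
  | fuel, (node, false) :: stack, st =>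
      if st.1.getD node 0 == 0 then
        match fuel with
        | 0 => st
        | f+1 =>
            pvRunB G f
              ((G.getD node []).reverse.foldl (fun s e => (e, false) :: s) ((node, true) :: stack))
              (st.1.insert node 1,
               st.2.1.insert node (PySem.List.pySetD (st.2.1.getD node []) 0 st.2.2), st.2.2 + 1)
      else pvRunB G fuel stack st
  termination_by fuel stack _ => (fuel, stack.length)
  decreasing_by
  · exact Prod.Lex.right _ (by simp)
  · exact Prod.Lex.left _ _ (by omega)
  · exact Prod.Lex.right _ (by simp)

def ExploreOrdering_alt (graph : List (Int × List Int)) (v : Int) (visited : List (Int × Int)) (visit_orderings : List (Int × List Int)) (clock : Int) : (List (Int × Int)) × (List (Int × List Int)) × Int :=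
  let G := PySem.Dict.mk graph
  let vis := (PySem.Dict.mk visited).insert v 1
  let vo0 := PySem.Dict.mk visit_orderings
  let vo := vo0.insert v (PySem.List.pySetD (vo0.getD v []) 0 clock)
  let stack := (G.getD v []).reverse.foldl (fun s e => (e, false) :: s) [(v, true)]
  let st := pvRunB G (visited.length + 2) stack (vis, vo, clock + 1)
  (st.1.items, st.2.1.items, st.2.2)

-- ===== PRECONDITION & SPEC =====
-- the set of nodes the DFS can expand: v plus the closure through edges whose endpoint is an
-- initially-unvisited key of visited (computed as a saturating fixpoint iteration)
def pvReachStep (graph : List (Int × List Int)) (v : Int) (visited : List (Int × Int)) (S : List Int) : List Int :=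
  PySem.Set.update S (S.flatMap (fun x => ((PySem.Dict.mk graph).getD x []).filter
    (fun e => !(e == v) && ((PySem.Dict.mk visited).getD e 1 == 0))))

def pvReachN (graph : List (Int × List Int)) (v : Int) (visited : List (Int × Int)) : Nat → List Int
  | 0 => [v]
  | n+1 => pvReachStep graph v visited (pvReachN graph v visited n)

def pvReach (graph : List (Int × List Int)) (v : Int) (visited : List (Int × Int)) : List Int :=
  pvReachN graph v visited (visited.length + 1)

-- Pre_ is exactly the domain on which the Python returns normally: every node the DFS can
-- expand is a key of graph and of visit_orderings with an orderings list of length ≥ 2, and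
-- every edge leaving such a node is v itself or a key of visited; keys of visited are distinct,
-- which every genuine Python dict satisfies.
def Pre_ExploreOrdering (graph : List (Int × List Int)) (v : Int) (visited : List (Int × Int)) (visit_orderings : List (Int × List Int)) (clock : Int) : Prop :=
  (PySem.Dict.mk visited).keys.Nodup ∧
  (∀ x ∈ pvReach graph v visited,
    (PySem.Dict.mk graph).contains x = true ∧
    (PySem.Dict.mk visit_orderings).contains x = true ∧
    2 ≤ ((PySem.Dict.mk visit_orderings).getD x []).length ∧
    (∀ e ∈ (PySem.Dict.mk graph).getD x [], e = v ∨ (PySem.Dict.mk visited).contains e = true))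
instance (graph : List (Int × List Int)) (v : Int) (visited : List (Int × Int)) (visit_orderings : List (Int × List Int)) (clock : Int) : Decidable (Pre_ExploreOrdering graph v visited visit_orderings clock) := by unfold Pre_ExploreOrdering; infer_instance

def pvWitness_ExploreOrdering : (List (Int × List Int)) × Int × (List (Int × Int)) × (List (Int × List Int)) × Int :=
  ([(0, [1]), (1, [])], 0, [(0, 0), (1, 0)], [(0, [0, 0]), (1, [0, 0])], 0)

def Spec_ExploreOrdering (graph : List (Int × List Int)) (v : Int) (visited : List (Int × Int)) (visit_orderings : List (Int × List Int)) (clock : Int) (out : (List (Int × Int)) × (List (Int × List Int)) × Int) : Prop := out = ExploreOrdering_alt graph v visited visit_orderings clock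
instance (graph : List (Int × List Int)) (v : Int) (visited : List (Int × Int)) (visit_orderings : List (Int × List Int)) (clock : Int) (out : (List (Int × Int)) × (List (Int × List Int)) × Int) : Decidable (Spec_ExploreOrdering graph v visited visit_orderings clock out) := by unfold Spec_ExploreOrdering; infer_instance

-- ===== CLAIM (what is proved, stated in full; the proofs are below) =====
def Claim_equal_ExploreOrdering : Prop := ∀ (graph : List (Int × List Int)) (v : Int) (visited : List (Int × Int)) (visit_orderings : List (Int × List Int)) (clock : Int), Dom_ExploreOrdering graph v visited visit_orderings clock → Pre_ExploreOrdering graph v visited visit_orderings clock → Spec_ExploreOrdering graph v visited visit_orderings clock (ExploreOrdering graph v visited visit_orderings clock)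

-- ===== LEMMAS AND PROOFS =====

-- number of still-unvisited entries (value 0) of the visited dict: the termination measure
def pvZC (vis : PySem.Dict Int Int) : Nat := vis.items.countP (fun p => p.2 == 0)

-- marking + pre-visit of a node, and post-visit, as state transformers
def pvStep0 (x : Int) (st : PvSt) : PvSt :=
  (st.1.insert x 1, (pvPrevisit x st.2.1 st.2.2).1, (pvPrevisit x st.2.1 st.2.2).2)
def pvPost (x : Int) (st : PvSt) : PvSt :=
  (st.1, (pvPostvisit x st.2.1 st.2.2).1, (pvPostvisit x st.2.1 st.2.2).2)

-- canonical (fuel-saturated) form of A's explorer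
def pvExploreF (G : PySem.Dict Int (List Int)) (x : Int) (st : PvSt) : PvSt :=
  pvExploreA G (pvZC st.1 + 1) x st

-- denotation of a B-stack as a sequence of A-actions
def pvDen (G : PySem.Dict Int (List Int)) : List (Int × Bool) → PvSt → PvSt
  | [], st => st
  | (x, true) :: s, st => pvDen G s (pvPost x st)
  | (x, false) :: s, st =>
      pvDen G s (if st.1.getD x 0 == 0 then pvExploreF G x st else st)

-- invariant on the evolving visited dict, relative to the root v0 and the initial dict V0
def pvInv (v0 : Int) (V0 : PySem.Dict Int Int) (vis : PySem.Dict Int Int) : Prop :=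
  vis.keys.Nodup ∧ (∀ k, V0.contains k = true → vis.contains k = true) ∧
  vis.getD v0 0 = 1 ∧
  (∀ k, V0.contains k = true → vis.getD k 0 = 0 → V0.getD k 1 = 0)

-- a node admissible as an edge target: either the root or an initial key, and in R if unvisited
def pvAdm (R : List Int) (v0 : Int) (V0 : PySem.Dict Int Int) (e : Int) : Prop :=
  (e = v0 ∨ V0.contains e = true) ∧ (e ≠ v0 → V0.getD e 1 = 0 → e ∈ R)

-- the reach set R is closed under admissible edges
def pvClosed (G : PySem.Dict Int (List Int)) (R : List Int) (v0 : Int)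
    (V0 : PySem.Dict Int Int) : Prop :=
  ∀ x ∈ R, ∀ e ∈ G.getD x [], pvAdm R v0 V0 e

theorem pvMem_items_zero (vis : PySem.Dict Int Int) (x : Int)
    (hc : vis.contains x = true) (h0 : vis.getD x 0 = 0) (hnd : vis.keys.Nodup) :
    (x, (0 : Int)) ∈ vis.items := by
  rw [PySem.Dict.contains_eq_isSome_get?] at hc
  obtain ⟨w, hw⟩ := Option.isSome_iff_exists.mp hc
  rw [PySem.Dict.getD_eq_get?_getD, hw] at h0
  simp only [Option.getD_some] at h0
  subst h0
  exact (PySem.Dict.get?_eq_some_iff_mem_items vis x _ hnd).mp hw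

theorem pvZC_insert_le (vis : PySem.Dict Int Int) (x : Int) :
    pvZC (vis.insert x 1) ≤ pvZC vis := by
  unfold pvZC
  rcases h : vis.contains x with _ | _
  · rw [PySem.Dict.items_insert_of_not_contains vis 1 h]
    simp [List.countP_append]
  · rw [PySem.Dict.items_insert_of_contains vis 1 h, List.countP_map]
    refine List.countP_mono_left ?_
    intro a _ ha
    simp only [Function.comp] at ha
    by_cases hax : (a.1 == x) = true
    · simp [hax] at ha
    · simp only [Bool.not_eq_true] at hax
      simpa [hax] using ha

theorem pvZC_insert_lt (vis : PySem.Dict Int Int) (x : Int)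
    (hc : vis.contains x = true) (h0 : vis.getD x 0 = 0) (hnd : vis.keys.Nodup) :
    pvZC (vis.insert x 1) < pvZC vis := by
  have hmem := pvMem_items_zero vis x hc h0 hnd
  obtain ⟨s, t, hst⟩ := List.append_of_mem hmem
  have hkeys : vis.keys = vis.items.map Prod.fst := rfl
  rw [hkeys, hst, List.map_append, List.map_cons, List.nodup_append] at hnd
  have hs : x ∉ s.map Prod.fst := fun hx => hnd.2.2 x hx x List.mem_cons_self rfl
  have ht : x ∉ t.map Prod.fst := (List.nodup_cons.mp hnd.2.1).1
  have hfix : ∀ (l : List (Int × Int)), x ∉ l.map Prod.fst →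
      ∀ a ∈ l, (a.1 == x) = false := by
    intro l hl a ha
    simp only [beq_eq_false_iff_ne]
    rintro rfl
    exact hl (List.mem_map_of_mem ha)
  unfold pvZC
  rw [PySem.Dict.items_insert_of_contains vis 1 hc, List.countP_map, hst]
  simp only [List.countP_append, List.countP_cons]
  have es : List.countP ((fun p => p.2 == 0) ∘ fun p => if (p.1 == x) = true then (x, 1) else p) s
      = List.countP (fun p : Int × Int => p.2 == 0) s := by
    refine List.countP_congr ?_
    intro a ha
    simp [Function.comp, hfix s hs a ha]
  have et : List.countP ((fun p => p.2 == 0) ∘ fun p => if (p.1 == x) = true then (x, 1) else p) t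
      = List.countP (fun p : Int × Int => p.2 == 0) t := by
    refine List.countP_congr ?_
    intro a ha
    simp [Function.comp, hfix t ht a ha]
  rw [es, et]
  simp [Function.comp]

theorem pvZC_pos (vis : PySem.Dict Int Int) (x : Int)
    (hc : vis.contains x = true) (h0 : vis.getD x 0 = 0) (hnd : vis.keys.Nodup) :
    1 ≤ pvZC vis := by
  have hmem := pvMem_items_zero vis x hc h0 hnd
  unfold pvZC
  exact List.countP_pos_iff.mpr ⟨(x, 0), hmem, by simp⟩

-- inserting a 1 preserves the invariant, whatever the key
theorem pvInv_insert1 (v0 : Int) (V0 vis : PySem.Dict Int Int) (x : Int)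
    (h : pvInv v0 V0 vis) : pvInv v0 V0 (vis.insert x 1) := by
  refine ⟨PySem.Dict.nodup_keys_insert vis x 1 h.1, ?_, ?_, ?_⟩
  · intro k hk
    rw [PySem.Dict.contains_insert]
    simp [h.2.1 k hk]
  · rw [PySem.Dict.getD_insert]
    by_cases hvx : v0 = x
    · simp [hvx]
    · rw [if_neg hvx]
      exact h.2.2.1
  · intro k hk h0
    rw [PySem.Dict.getD_insert] at h0
    by_cases hkx : k = x
    · simp [hkx] at h0
    · rw [if_neg hkx] at h0
      exact h.2.2.2 k hk h0

theorem pvInv_step0 (v0 : Int) (V0 : PySem.Dict Int Int) (st : PvSt) (x : Int)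
    (h : pvInv v0 V0 st.1) : pvInv v0 V0 (pvStep0 x st).1 :=
  pvInv_insert1 v0 V0 st.1 x h

-- an admissible node that is still dynamically unvisited is in R and an existing key
theorem pvAdm_expand (R : List Int) (v0 : Int) (V0 vis : PySem.Dict Int Int) (e : Int)
    (ha : pvAdm R v0 V0 e) (hinv : pvInv v0 V0 vis) (h0 : vis.getD e 0 = 0) :
    e ∈ R ∧ vis.contains e = true := by
  rcases ha.1 with rfl | hc
  · rw [hinv.2.2.1] at h0
    exact absurd h0 one_ne_zero
  · have hne : e ≠ v0 := by
      rintro rfl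
      rw [hinv.2.2.1] at h0
      exact absurd h0 one_ne_zero
    exact ⟨ha.2 hne (hinv.2.2.2 e hc h0), hinv.2.1 e hc⟩

theorem pvZC_step0_lt (R : List Int) (v0 : Int) (V0 : PySem.Dict Int Int) (st : PvSt) (x : Int)
    (hinv : pvInv v0 V0 st.1) (hc : st.1.contains x = true) (h0 : st.1.getD x 0 = 0) :
    pvZC (pvStep0 x st).1 < pvZC st.1 :=
  pvZC_insert_lt st.1 x hc h0 hinv.1

theorem pvDen_append (G : PySem.Dict Int (List Int)) (a b : List (Int × Bool)) (st : PvSt) :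
    pvDen G (a ++ b) st = pvDen G b (pvDen G a st) := by
  induction a generalizing st with
  | nil => rfl
  | cons p rest ih =>
    rcases p with ⟨x, b'⟩
    cases b' <;> simp [pvDen, ih]

theorem pvRevFoldl (adj : List Int) (acc : List (Int × Bool)) :
    adj.reverse.foldl (fun s e => (e, false) :: s) acc
      = adj.map (fun e => (e, false)) ++ acc := by
  induction adj generalizing acc with
  | nil => rfl
  | cons e rest ih =>
    simp only [List.reverse_cons, List.foldl_append, List.foldl_cons, List.foldl_nil,
      List.map_cons, ih]
    rfl

theorem pvExploreA_succ (G : PySem.Dict Int (List Int)) (f : Nat) (v : Int) (st : PvSt) :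
    pvExploreA G (f+1) v st
      = pvPost v ((G.getD v []).foldl
          (fun s e => if s.1.getD e 0 == 0 then pvExploreA G f e s else s) (pvStep0 v st)) := rfl

-- main A-side lemma: under the invariant, at an unvisited reachable node the explorer is
-- fuel-irrelevant (any fuel ≥ pvZC + 1 gives pvExploreF), preserves the invariant, and
-- strictly decreases pvZC
theorem pvExploreA_main (G : PySem.Dict Int (List Int)) (R : List Int) (v0 : Int)
    (V0 : PySem.Dict Int Int) (hcl : pvClosed G R v0 V0) :
    ∀ n : Nat, ∀ (v : Int) (st : PvSt) (f : Nat),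
      pvInv v0 V0 st.1 → v ∈ R → st.1.contains v = true → st.1.getD v 0 = 0 →
      pvZC st.1 ≤ n → pvZC st.1 + 1 ≤ f →
      pvExploreA G f v st = pvExploreF G v st ∧
      pvInv v0 V0 (pvExploreA G f v st).1 ∧
      pvZC (pvExploreA G f v st).1 < pvZC st.1 := by
  intro n
  induction n using Nat.strong_induction_on with
  | _ n IH =>
  intro v st f hinv hv hcv h0 hn hf
  have hzpos : 1 ≤ pvZC st.1 := pvZC_pos st.1 v hcv h0 hinv.1
  obtain ⟨f', rfl⟩ : ∃ f', f = f' + 1 := ⟨f - 1, by omega⟩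
  have hstep : pvZC (pvStep0 v st).1 < pvZC st.1 := pvZC_step0_lt R v0 V0 st v hinv hcv h0
  have hinv1 : pvInv v0 V0 (pvStep0 v st).1 := pvInv_step0 v0 V0 st v hinv
  have hadj : ∀ e ∈ G.getD v [], pvAdm R v0 V0 e := hcl v hv
  -- the loop over the adjacency list, with any sufficient fuel, equals its pvDen form
  have inner : ∀ (adj : List Int), (∀ e ∈ adj, pvAdm R v0 V0 e) →
      ∀ (s : PvSt) (g : Nat), pvInv v0 V0 s.1 → pvZC s.1 < pvZC st.1 → pvZC st.1 ≤ g →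
      (adj.foldl (fun s e => if s.1.getD e 0 == 0 then pvExploreA G g e s else s) s
        = pvDen G (adj.map (fun e => (e, false))) s) ∧
      pvInv v0 V0 (pvDen G (adj.map (fun e => (e, false))) s).1 ∧
      pvZC (pvDen G (adj.map (fun e => (e, false))) s).1 ≤ pvZC s.1 := by
    intro adj
    induction adj with
    | nil =>
      intro _ s g hinvs hzs _
      exact ⟨rfl, hinvs, le_refl _⟩
    | cons e rest ihadj =>
      intro hgood s g hinvs hzs hg
      simp only [List.foldl_cons, List.map_cons, pvDen]
      by_cases hch : (s.1.getD e 0 == 0) = true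
      · rw [if_pos hch, if_pos hch]
        obtain ⟨heR, hec⟩ := pvAdm_expand R v0 V0 s.1 e (hgood e (by simp)) hinvs
          (beq_iff_eq.mp hch)
        obtain ⟨he, hinve, hze⟩ := IH (pvZC s.1) (by omega) e s g hinvs heR hec
          (beq_iff_eq.mp hch) le_rfl (by omega)
        rw [he] at hinve hze
        rw [he]
        have hrec := ihadj (fun e' he' => hgood e' (by simp [he'])) (pvExploreF G e s) g
          hinve (by omega) hg
        exact ⟨hrec.1, hrec.2.1, le_trans hrec.2.2 (by omega)⟩
      · rw [if_neg (by simpa using hch), if_neg (by simpa using hch)]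
        exact ihadj (fun e' he' => hgood e' (by simp [he'])) s g hinvs hzs hg
  have h1 := inner (G.getD v []) hadj (pvStep0 v st) f' hinv1 hstep (by omega)
  have h2 := inner (G.getD v []) hadj (pvStep0 v st) (pvZC st.1) hinv1 hstep le_rfl
  rw [pvExploreA_succ, pvExploreF]
  rw [show pvZC st.1 + 1 = (pvZC st.1) + 1 from rfl, pvExploreA_succ]
  rw [h1.1, h2.1]
  refine ⟨rfl, ?_, ?_⟩
  · exact h1.2.1
  · have : pvZC (pvPost v (pvDen G ((G.getD v []).map (fun e => (e, false))) (pvStep0 v st))).1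
        = pvZC (pvDen G ((G.getD v []).map (fun e => (e, false))) (pvStep0 v st)).1 := rfl
    rw [this]
    omega

-- the foldl over an adjacency list equals the denotation of the corresponding stack segment
theorem pvFoldl_den (G : PySem.Dict Int (List Int)) (R : List Int) (v0 : Int)
    (V0 : PySem.Dict Int Int) (hcl : pvClosed G R v0 V0) (adj : List Int) :
    ∀ (st : PvSt) (f : Nat),
      pvInv v0 V0 st.1 → (∀ e ∈ adj, pvAdm R v0 V0 e) →
      pvZC st.1 + 1 ≤ f →
      (adj.foldl (fun s e => if s.1.getD e 0 == 0 then pvExploreA G f e s else s) st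
         = pvDen G (adj.map (fun e => (e, false))) st) ∧
      pvInv v0 V0 (pvDen G (adj.map (fun e => (e, false))) st).1 ∧
      pvZC (pvDen G (adj.map (fun e => (e, false))) st).1 ≤ pvZC st.1 := by
  induction adj with
  | nil =>
    intro st f hinv _ _
    exact ⟨rfl, hinv, le_refl _⟩
  | cons e rest ih =>
    intro st f hinv hgood hf
    simp only [List.foldl_cons, List.map_cons, pvDen]
    by_cases hch : (st.1.getD e 0 == 0) = true
    · rw [if_pos hch, if_pos hch]
      obtain ⟨heR, hec⟩ := pvAdm_expand R v0 V0 st.1 e (hgood e (by simp)) hinv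
        (beq_iff_eq.mp hch)
      obtain ⟨he, hinve, hze⟩ := pvExploreA_main G R v0 V0 hcl (pvZC st.1) e st f hinv heR hec
        (beq_iff_eq.mp hch) le_rfl hf
      rw [he] at hinve hze
      rw [he]
      have hrec := ih (pvExploreF G e st) f hinve (fun e' he' => hgood e' (by simp [he']))
        (by omega)
      exact ⟨hrec.1, hrec.2.1, le_trans hrec.2.2 (by omega)⟩
    · rw [if_neg (by simpa using hch), if_neg (by simpa using hch)]
      exact ih st f hinv (fun e' he' => hgood e' (by simp [he'])) hf

-- canonical unfolding of one exploration step into pvDen form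
theorem pvExplore_canon (G : PySem.Dict Int (List Int)) (R : List Int) (v0 : Int)
    (V0 : PySem.Dict Int Int) (hcl : pvClosed G R v0 V0) (v : Int) (st : PvSt) (f : Nat)
    (hinv1 : pvInv v0 V0 (pvStep0 v st).1) (hv : v ∈ R)
    (hf : pvZC (pvStep0 v st).1 + 2 ≤ f) :
    pvExploreA G f v st
      = pvPost v (pvDen G ((G.getD v []).map (fun e => (e, false))) (pvStep0 v st)) := by
  cases f with
  | zero => exact absurd hf (by omega)
  | succ f' =>
  have hf2 : pvZC (pvStep0 v st).1 + 1 ≤ f' := Nat.le_of_succ_le_succ hf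
  rw [pvExploreA_succ]
  have h := pvFoldl_den G R v0 V0 hcl (G.getD v []) (pvStep0 v st) f' hinv1 (hcl v hv) hf2
  rw [h.1]

theorem pvRunB_nil (G : PySem.Dict Int (List Int)) (f : Nat) (st : PvSt) :
    pvRunB G f [] st = st := by
  rw [pvRunB.eq_def]

theorem pvRunB_true (G : PySem.Dict Int (List Int)) (f : Nat) (x : Int)
    (s : List (Int × Bool)) (st : PvSt) :
    pvRunB G f ((x, true) :: s) st = pvRunB G f s (pvPost x st) := by
  rw [pvRunB.eq_def]
  rfl

theorem pvRunB_skip (G : PySem.Dict Int (List Int)) (f : Nat) (x : Int)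
    (s : List (Int × Bool)) (st : PvSt) (h : (st.1.getD x 0 == 0) = false) :
    pvRunB G f ((x, false) :: s) st = pvRunB G f s st := by
  rw [pvRunB.eq_def]
  simp [h]

theorem pvRunB_expand (G : PySem.Dict Int (List Int)) (f : Nat) (x : Int)
    (s : List (Int × Bool)) (st : PvSt) (h : (st.1.getD x 0 == 0) = true) :
    pvRunB G (f+1) ((x, false) :: s) st
      = pvRunB G f ((G.getD x []).reverse.foldl (fun s e => (e, false) :: s) ((x, true) :: s))
          (pvStep0 x st) := by
  rw [pvRunB.eq_def]
  simp [h]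
  rfl

-- main B-side lemma: the stack machine computes the denotation of its stack
theorem pvRunB_den (G : PySem.Dict Int (List Int)) (R : List Int) (v0 : Int)
    (V0 : PySem.Dict Int Int) (hcl : pvClosed G R v0 V0) :
    ∀ n : Nat, ∀ (stack : List (Int × Bool)) (st : PvSt) (f : Nat),
      pvInv v0 V0 st.1 → (∀ p ∈ stack, p.2 = false → pvAdm R v0 V0 p.1) →
      pvZC st.1 ≤ n → n + 1 ≤ f →
      pvRunB G f stack st = pvDen G stack st := by
  intro n
  induction n using Nat.strong_induction_on with
  | _ n IH =>
  intro stack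
  induction stack with
  | nil =>
    intro st f _ _ _ _
    rw [pvRunB_nil, pvDen]
  | cons p rest ihs =>
    intro st f hinv hgood hz hf
    rcases p with ⟨x, b⟩
    cases b
    · -- pop an unprocessed frame
      have hax : pvAdm R v0 V0 x := hgood (x, false) (by simp) rfl
      by_cases hch : (st.1.getD x 0 == 0) = true
      · -- expansion
        have h0 : st.1.getD x 0 = 0 := beq_iff_eq.mp hch
        obtain ⟨hxR, hxc⟩ := pvAdm_expand R v0 V0 st.1 x hax hinv h0
        have hzp : 1 ≤ pvZC st.1 := pvZC_pos st.1 x hxc h0 hinv.1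
        cases f with
        | zero => exact absurd hf (by omega)
        | succ f' =>
        rw [pvRunB_expand G f' x rest st hch, pvRevFoldl]
        have hlt : pvZC (pvStep0 x st).1 < pvZC st.1 := pvZC_step0_lt R v0 V0 st x hinv hxc h0
        have hgood' : ∀ p ∈ (G.getD x []).map (fun e => (e, false)) ++ (x, true) :: rest,
            p.2 = false → pvAdm R v0 V0 p.1 := by
          intro p hp hpf
          rcases List.mem_append.mp hp with hp | hp
          · obtain ⟨e, he, rfl⟩ := List.mem_map.mp hp
            exact hcl x hxR e he
          · rcases List.mem_cons.mp hp with rfl | hp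
            · simp at hpf
            · exact hgood p (by simp [hp]) hpf
        rw [IH (n-1) (by omega) ((G.getD x []).map (fun e => (e, false)) ++ (x, true) :: rest)
          (pvStep0 x st) f' (pvInv_step0 v0 V0 st x hinv) hgood' (by omega) (by omega)]
        rw [pvDen_append]
        simp only [pvDen]
        rw [if_pos hch]
        congr 1
        rw [pvExploreF, pvExplore_canon G R v0 V0 hcl x st (pvZC st.1 + 1)
          (pvInv_step0 v0 V0 st x hinv) hxR (by omega)]
      · -- already visited: skip
        rw [pvRunB_skip G f x rest st (by simpa using hch)]
        simp only [pvDen]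
        rw [if_neg (by simpa using hch)]
        exact ihs st f hinv (fun p hp => hgood p (by simp [hp])) hz hf
    · -- pop a processed frame: post-visit
      rw [pvRunB_true]
      simp only [pvDen]
      exact ihs (pvPost x st) f hinv (fun p hp => hgood p (by simp [hp])) hz hf

-- ===== reach-set lemmas =====
theorem pvReach_mem_root (graph : List (Int × List Int)) (v : Int) (visited : List (Int × Int)) :
    v ∈ pvReach graph v visited := by
  have h : ∀ n, v ∈ pvReachN graph v visited n := by
    intro n
    induction n with
    | zero => simp [pvReachN]
    | succ n ih => exact (PySem.Set.mem_update _ _ _).mpr (Or.inl ih)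
  exact h _

theorem pvReachN_nodup (graph : List (Int × List Int)) (v : Int) (visited : List (Int × Int)) :
    ∀ n, (pvReachN graph v visited n).Nodup := by
  intro n
  induction n with
  | zero => simp [pvReachN]
  | succ n ih => exact PySem.Set.nodup_update _ _ ih

theorem pvReachN_bound (graph : List (Int × List Int)) (v : Int) (visited : List (Int × Int)) :
    ∀ n, ∀ y ∈ pvReachN graph v visited n, y = v ∨ y ∈ (PySem.Dict.mk visited).keys := by
  intro n
  induction n with
  | zero =>
    intro y hy
    simp only [pvReachN, List.mem_singleton] at hy
    exact Or.inl hy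
  | succ n ih =>
    intro y hy
    rcases (PySem.Set.mem_update _ _ _).mp hy with hy | hy
    · exact ih y hy
    · obtain ⟨x, _, hy⟩ := List.mem_flatMap.mp hy
      obtain ⟨_, hcond⟩ := List.mem_filter.mp hy
      simp only [Bool.and_eq_true, Bool.not_eq_eq_eq_not, Bool.not_true, beq_iff_eq] at hcond
      right
      rw [← PySem.Dict.contains_iff_mem_keys]
      rcases hc : (PySem.Dict.mk visited).contains y with _ | _
      · rw [PySem.Dict.getD_of_not_contains _ 1 hc] at hcond
        exact absurd hcond.2 one_ne_zero
      · rfl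

theorem pvReachN_length_le (graph : List (Int × List Int)) (v : Int)
    (visited : List (Int × Int)) (n : Nat) :
    (pvReachN graph v visited n).length ≤ visited.length + 1 := by
  have hsub : pvReachN graph v visited n ⊆ v :: (PySem.Dict.mk visited).keys := by
    intro y hy
    rcases pvReachN_bound graph v visited n y hy with rfl | hy
    · exact List.mem_cons_self
    · exact List.mem_cons_of_mem _ hy
  have := ((pvReachN_nodup graph v visited n).subperm hsub).length_le
  have hk : (PySem.Dict.mk visited).keys.length = visited.length := by
    simp [PySem.Dict.keys]
  simp only [List.length_cons, hk] at this
  omega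

theorem pvReach_closed (graph : List (Int × List Int)) (v : Int) (visited : List (Int × Int))
    (x e : Int) (hx : x ∈ pvReach graph v visited)
    (he : e ∈ (PySem.Dict.mk graph).getD x []) (hne : e ≠ v)
    (h0 : (PySem.Dict.mk visited).getD e 1 = 0) : e ∈ pvReach graph v visited := by
  have hstep_mem : ∀ S, x ∈ S → e ∈ pvReachStep graph v visited S := by
    intro S hxS
    refine (PySem.Set.mem_update _ _ _).mpr (Or.inr (List.mem_flatMap.mpr ⟨x, hxS, ?_⟩))
    refine List.mem_filter.mpr ⟨he, ?_⟩
    simp [hne, h0]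
  have hgrow : ∀ S : List Int, S.Nodup → pvReachStep graph v visited S ≠ S →
      S.length < (pvReachStep graph v visited S).length := by
    have haux : ∀ (S t : List Int), S ++ t ≠ S → S.length < (S ++ t).length := by
      intro S t h
      cases t with
      | nil => simp at h
      | cons a t => simp
    intro S _ hneS
    rw [pvReachStep, PySem.Set.update_eq_append_filter] at hneS ⊢
    exact haux _ _ hneS
  have hchain : ∀ i j, i ≤ j →
      pvReachN graph v visited (i+1) = pvReachN graph v visited i →
      pvReachN graph v visited (j+1) = pvReachN graph v visited j := by
    intro i j hij hfix
    induction j with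
    | zero =>
      have : i = 0 := Nat.le_zero.mp hij
      subst this
      exact hfix
    | succ j ihj =>
      rcases Nat.lt_or_ge i (j+1) with hlt | hge
      · have hj := ihj (by omega)
        show pvReachStep graph v visited (pvReachN graph v visited (j+1))
          = pvReachN graph v visited (j+1)
        calc pvReachStep graph v visited (pvReachN graph v visited (j+1))
            = pvReachStep graph v visited (pvReachN graph v visited j) := by rw [hj]
          _ = pvReachN graph v visited (j+1) := rfl
      · have : i = j + 1 := by omega
        subst this
        exact hfix
  have hsat : pvReachN graph v visited (visited.length + 2)
      = pvReachN graph v visited (visited.length + 1) := by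
    by_contra hneq
    have hall : ∀ i, i ≤ visited.length + 1 →
        pvReachN graph v visited (i+1) ≠ pvReachN graph v visited i := by
      intro i hi heq
      exact hneq (hchain i (visited.length + 1) hi heq)
    have hlen : ∀ i, i ≤ visited.length + 2 →
        i + 1 ≤ (pvReachN graph v visited i).length := by
      intro i
      induction i with
      | zero =>
        intro _
        simp [pvReachN]
      | succ i ihi =>
        intro hi
        have h1 := ihi (by omega)
        have h2 := hgrow (pvReachN graph v visited i) (pvReachN_nodup graph v visited i)
          (hall i (by omega))
        have h3 : pvReachN graph v visited (i+1)
            = pvReachStep graph v visited (pvReachN graph v visited i) := rfl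
        rw [h3]
        omega
    have hA := hlen (visited.length + 2) le_rfl
    have hB := pvReachN_length_le graph v visited (visited.length + 2)
    omega
  have hmem : e ∈ pvReachStep graph v visited (pvReachN graph v visited (visited.length + 1)) :=
    hstep_mem _ hx
  have : e ∈ pvReachN graph v visited (visited.length + 2) := hmem
  rw [hsat] at this
  exact this

-- the invariant holds right after the root is marked
theorem pvInv_init (v : Int) (V0 : PySem.Dict Int Int) (hnd : V0.keys.Nodup) :
    pvInv v V0 (V0.insert v 1) := by
  refine ⟨PySem.Dict.nodup_keys_insert V0 v 1 hnd, ?_, ?_, ?_⟩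
  · intro k hk
    rw [PySem.Dict.contains_insert]
    simp [hk]
  · rw [PySem.Dict.getD_insert]
    simp
  · intro k hk h0
    rw [PySem.Dict.getD_insert] at h0
    by_cases hkv : k = v
    · simp [hkv] at h0
    · rw [if_neg hkv] at h0
      rw [PySem.Dict.contains_eq_isSome_get?] at hk
      obtain ⟨w, hw⟩ := Option.isSome_iff_exists.mp hk
      rw [PySem.Dict.getD_eq_get?_getD, hw] at h0 ⊢
      simpa using h0

-- ===== VERDICT (by name: the statement is the Claim_ definition above) =====
theorem ExploreOrdering_spec : Claim_equal_ExploreOrdering := by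
  intro graph v visited visit_orderings clock _ hpre
  obtain ⟨hnd, hall⟩ := hpre
  have hcl : pvClosed (PySem.Dict.mk graph) (pvReach graph v visited) v
      (PySem.Dict.mk visited) := by
    intro x hx e he
    refine ⟨(hall x hx).2.2.2 e he, fun hne h0 => ?_⟩
    exact pvReach_closed graph v visited x e hx he hne h0
  have hv : v ∈ pvReach graph v visited := pvReach_mem_root graph v visited
  have hinv1 : pvInv v (PySem.Dict.mk visited)
      (pvStep0 v (PySem.Dict.mk visited, PySem.Dict.mk visit_orderings, clock)).1 :=
    pvInv_init v (PySem.Dict.mk visited) hnd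
  have hzc : pvZC (PySem.Dict.mk visited) ≤ visited.length := List.countP_le_length
  have hstep : pvZC (pvStep0 v (PySem.Dict.mk visited, PySem.Dict.mk visit_orderings, clock)).1
      ≤ pvZC (PySem.Dict.mk visited) := pvZC_insert_le (PySem.Dict.mk visited) v
  show (let st := pvExploreA (PySem.Dict.mk graph) (visited.length + 2) v
          (PySem.Dict.mk visited, PySem.Dict.mk visit_orderings, clock)
        (st.1.items, st.2.1.items, st.2.2))
      = (let st := pvRunB (PySem.Dict.mk graph) (visited.length + 2)
          (((PySem.Dict.mk graph).getD v []).reverse.foldl (fun s e => (e, false) :: s) [(v, true)])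
          (pvStep0 v (PySem.Dict.mk visited, PySem.Dict.mk visit_orderings, clock))
        (st.1.items, st.2.1.items, st.2.2))
  simp only []
  rw [pvExplore_canon (PySem.Dict.mk graph) (pvReach graph v visited) v (PySem.Dict.mk visited)
    hcl v (PySem.Dict.mk visited, PySem.Dict.mk visit_orderings, clock) (visited.length + 2)
    hinv1 hv (by omega)]
  rw [pvRevFoldl]
  have hgoods : ∀ p ∈ ((PySem.Dict.mk graph).getD v []).map (fun e => (e, false)) ++ [(v, true)],
      p.2 = false → pvAdm (pvReach graph v visited) v (PySem.Dict.mk visited) p.1 := by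
    intro p hp hpf
    rcases List.mem_append.mp hp with hp | hp
    · obtain ⟨e, he, rfl⟩ := List.mem_map.mp hp
      exact hcl v hv e he
    · rcases List.mem_cons.mp hp with rfl | hp
      · simp at hpf
      · simp at hp
  rw [pvRunB_den (PySem.Dict.mk graph) (pvReach graph v visited) v (PySem.Dict.mk visited) hcl
    visited.length _ _ (visited.length + 2) hinv1 hgoods (by omega) (by omega)]
  rw [pvDen_append]
  simp only [pvDen]
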